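-- pv_equiv track=rewrite | github.com/tallmega/new-recon | new-recon-ainotes.py | choose_schemes_and_ports
-- ===== SOURCE A (Python) =====
-- from typing import List, Tuple, Dict, Optional
--
-- WEB_PORTS = [443, 80, 8080, 8443, 8008, 8000, 8888, 3000, 5000]
--
-- PORT_PREFERENCE = [443, 8443, 9443, 10443, 80, 8080, 8000, 8888, 3000, 5000]
--
-- HTTPS_PORTS = {443, 4443, 5443, 6443, 7443, 8443, 9443, 10443}
--
-- def choose_schemes_and_ports(ports: List[int], limit: int) -> List[Tuple[str, int]]:
--     if limit <= 0 or "NONE" in ports: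
--         return []
--     webset = [p for p in ports if isinstance(p, int) and p in WEB_PORTS]
--     if not webset:
--         return []
--     ordered = []
--     seen = set()
--     for pref in PORT_PREFERENCE:
--         if pref in webset and pref not in seen:
--             ordered.append(pref)
--             seen.add(pref)
--     for p in sorted(set(webset)):
--         if p not in seen:
--             ordered.append(p)
--             seen.add(p)
--     combos = []
--     for port in ordered:
--         scheme = "https" if port in HTTPS_PORTS else "http"
--         combos.append((scheme, port))
--         if len(combos) >= limit:
--             break
--     return combos
-- ===== SOURCE B (Python) =====
-- from typing import List, Tuple
--
-- WEB_PORTS = [443, 80, 8080, 8443, 8008, 8000, 8888, 3000, 5000]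
--
-- PORT_PREFERENCE = [443, 8443, 9443, 10443, 80, 8080, 8000, 8888, 3000, 5000]
--
-- HTTPS_PORTS = {443, 4443, 5443, 6443, 7443, 8443, 9443, 10443}
--
-- def choose_schemes_and_ports(ports: List[int], limit: int) -> List[Tuple[str, int]]:
--     if limit <= 0 or "NONE" in ports:
--         return []
--     pref_index = {port: i for i, port in enumerate(PORT_PREFERENCE)}
--     unique = {p for p in ports if isinstance(p, int) and p in WEB_PORTS}
--     if not unique:
--         return []
--     ordered = sorted(unique, key=lambda p: (pref_index.get(p, len(PORT_PREFERENCE)), p))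
--     return [("https" if p in HTTPS_PORTS else "http", p) for p in ordered][:limit]
-- ===== Notes on version B (the rewrite author's own statement) =====
-- stated objective: simpler
-- what changed: A's two ordering passes (a scan over PORT_PREFERENCE plus a scan over the sorted set, both deduplicating through a 'seen' set) are replaced by a single sort of the unique web ports under the tuple key (preference-index from a dict built once, port number), followed by a comprehension and a slice.
import Mathlib
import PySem

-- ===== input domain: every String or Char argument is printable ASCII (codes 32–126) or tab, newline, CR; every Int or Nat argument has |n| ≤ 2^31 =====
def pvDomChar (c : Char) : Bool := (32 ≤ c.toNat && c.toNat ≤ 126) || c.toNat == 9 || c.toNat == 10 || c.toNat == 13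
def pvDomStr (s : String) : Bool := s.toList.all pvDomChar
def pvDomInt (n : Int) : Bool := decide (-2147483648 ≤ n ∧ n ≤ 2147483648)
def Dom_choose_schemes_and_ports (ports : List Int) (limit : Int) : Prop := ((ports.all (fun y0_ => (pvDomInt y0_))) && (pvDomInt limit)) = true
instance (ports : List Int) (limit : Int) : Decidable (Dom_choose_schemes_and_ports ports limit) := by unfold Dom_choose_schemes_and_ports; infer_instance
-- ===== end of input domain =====

-- B replaces A's two ordering passes (preference scan + sorted-set scan with a 'seen' set)
-- by one sort of the unique web ports under the tuple key (preference-index, port); objective: simpler.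

-- ===== PORT A =====
def pvWEB_PORTS : List Int := [443, 80, 8080, 8443, 8008, 8000, 8888, 3000, 5000]

def pvPORT_PREFERENCE : List Int := [443, 8443, 9443, 10443, 80, 8080, 8000, 8888, 3000, 5000]

def pvHTTPS_PORTS : PySem.Set Int := PySem.Set.ofList [443, 4443, 5443, 6443, 7443, 8443, 9443, 10443]

-- A's final 'for port in ordered: … if len(combos) >= limit: break' loop
def pvCombosLoop (limit : Int) : List Int → List (String × Int) → List (String × Int)
  | [], combos => combos
  | port :: rest, combos =>
    let scheme := if pvHTTPS_PORTS.contains port then "https" else "http"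
    let combos' := combos ++ [(scheme, port)]
    if limit ≤ (combos'.length : Int) then combos' else pvCombosLoop limit rest combos'

def choose_schemes_and_ports (ports : List Int) (limit : Int) : List (String × Int) :=
  -- '"NONE" in ports' is False on every List Int (an int never equals a str), so only the limit guard remains;
  -- 'isinstance(p, int)' is always True on a List Int.
  if limit ≤ 0 then []
  else
    let webset := ports.filter (fun p => pvWEB_PORTS.contains p)
    if webset = [] then []
    else
      let st1 := pvPORT_PREFERENCE.foldl
        (fun (st : List Int × PySem.Set Int) pref =>
          if webset.contains pref && !(PySem.Set.contains st.2 pref) then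
            (st.1 ++ [pref], PySem.Set.add st.2 pref)
          else st)
        ([], PySem.Set.empty)
      let st2 := (PySem.List.sorted (PySem.Set.ofList webset) (fun x => x) false).foldl
        (fun (st : List Int × PySem.Set Int) p =>
          if !(PySem.Set.contains st.2 p) then
            (st.1 ++ [p], PySem.Set.add st.2 p)
          else st)
        st1
      pvCombosLoop limit st2.1 []

-- ===== PORT B =====
def choose_schemes_and_ports_alt (ports : List Int) (limit : Int) : List (String × Int) :=
  -- '"NONE" in ports' is False on every List Int; 'isinstance(p, int)' is always True.
  if limit ≤ 0 then []
  else
    let pref_index : PySem.Dict Int Int :=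
      (PySem.List.enumerate pvPORT_PREFERENCE).foldl (fun d iv => d.insert iv.2 iv.1) PySem.Dict.empty
    let unique : PySem.Set Int := PySem.Set.ofList (ports.filter (fun p => pvWEB_PORTS.contains p))
    if unique = [] then []
    else
      let ordered := PySem.List.sorted2 unique
        (fun p => pref_index.getD p ((pvPORT_PREFERENCE.length : Int))) (fun p => p) false
      PySem.List.slice (ordered.map (fun p => (if pvHTTPS_PORTS.contains p then "https" else "http", p)))
        none (some limit)

-- ===== PRECONDITION & SPEC =====
def Spec_choose_schemes_and_ports (ports : List Int) (limit : Int) (out : List (String × Int)) : Prop := out = choose_schemes_and_ports_alt ports limit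
instance (ports : List Int) (limit : Int) (out : List (String × Int)) : Decidable (Spec_choose_schemes_and_ports ports limit out) := by unfold Spec_choose_schemes_and_ports; infer_instance

-- ===== CLAIM (what is proved, stated in full; the proofs are below) =====
def Claim_equal_choose_schemes_and_ports : Prop := ∀ (ports : List Int) (limit : Int), Dom_choose_schemes_and_ports ports limit → Spec_choose_schemes_and_ports ports limit (choose_schemes_and_ports ports limit)

-- ===== LEMMAS AND PROOFS =====

-- the order both programs produce (preference order, then remaining web ports ascending), its two halves,
-- and the web ports in ascending order
def pvCANON : List Int := [443, 8443, 80, 8080, 8000, 8888, 3000, 5000, 8008]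
def pvPREF8 : List Int := [443, 8443, 80, 8080, 8000, 8888, 3000, 5000]
def pvSORTED9 : List Int := [80, 443, 3000, 5000, 8000, 8008, 8080, 8443, 8888]

lemma pv_contains_iff (s : PySem.Set Int) (y : Int) :
    PySem.Set.contains s y = true ↔ y ∈ s := by
  simp [PySem.Set.contains]

lemma pv_contains_add (s : PySem.Set Int) (x y : Int) :
    PySem.Set.contains (PySem.Set.add s x) y = (PySem.Set.contains s y || y == x) := by
  by_cases h : y ∈ PySem.Set.add s x
  · rw [PySem.Set.mem_add] at h
    have h1 : PySem.Set.contains (PySem.Set.add s x) y = true := by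
      rw [pv_contains_iff, PySem.Set.mem_add]; exact h
    rw [h1]; rcases h with h | h
    · rw [(pv_contains_iff s y).mpr h]; simp
    · simp [h]
  · have h1 : PySem.Set.contains (PySem.Set.add s x) y = false := by
      rw [Bool.eq_false_iff]; intro hc; exact h ((pv_contains_iff _ y).mp hc)
    rw [PySem.Set.mem_add] at h
    have h2 : y ∉ s := fun hy => h (Or.inl hy)
    have h3 : y ≠ x := fun hy => h (Or.inr hy)
    have h4 : PySem.Set.contains s y = false := by
      rw [Bool.eq_false_iff]; intro hc; exact h2 ((pv_contains_iff s y).mp hc)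
    rw [h1, h4]
    simp [h3]

-- A's first ordering loop (over PORT_PREFERENCE, guarded by membership in webset and 'seen')
lemma pv_foldA1 (c : Int → Bool) (xs : List Int) (hnd : xs.Nodup) :
    ∀ (ord : List Int) (seen : PySem.Set Int),
      (List.foldl
        (fun (st : List Int × PySem.Set Int) pref =>
          if c pref && !(PySem.Set.contains st.2 pref) then
            (st.1 ++ [pref], PySem.Set.add st.2 pref)
          else st)
        (ord, seen) xs).1
        = ord ++ xs.filter (fun x => c x && !(PySem.Set.contains seen x)) ∧
      ∀ y, PySem.Set.contains
        (List.foldl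
          (fun (st : List Int × PySem.Set Int) pref =>
            if c pref && !(PySem.Set.contains st.2 pref) then
              (st.1 ++ [pref], PySem.Set.add st.2 pref)
            else st)
          (ord, seen) xs).2 y
        = (PySem.Set.contains seen y || (c y && xs.contains y)) := by
  induction xs with
  | nil => intro ord seen; simp
  | cons x xs ih =>
    intro ord seen
    have hx : x ∉ xs := (List.nodup_cons.mp hnd).1
    have ih' := ih (List.nodup_cons.mp hnd).2
    by_cases h : (c x && !(PySem.Set.contains seen x)) = true
    · rw [List.foldl_cons, if_pos h]
      obtain ⟨hcx, hsx⟩ := Bool.and_eq_true_iff.mp h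
      have hsx' : PySem.Set.contains seen x = false := by rwa [Bool.not_eq_true'] at hsx
      have ih2 := ih' (ord ++ [x]) (PySem.Set.add seen x)
      constructor
      · rw [ih2.1]
        have hf : xs.filter (fun z => c z && !(PySem.Set.contains (PySem.Set.add seen x) z))
            = xs.filter (fun z => c z && !(PySem.Set.contains seen z)) := by
          apply List.filter_congr
          intro z hz
          have hzx : (z == x) = false := by
            simp only [beq_eq_false_iff_ne]; intro he; exact hx (he ▸ hz)
          rw [pv_contains_add, hzx, Bool.or_false]
        rw [hf, List.filter_cons, if_pos h]
        simp
      · intro y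
        rw [ih2.2 y, pv_contains_add, List.contains_cons]
        by_cases hyx : y = x
        · subst hyx; simp [hcx]
        · simp [beq_eq_false_iff_ne.mpr hyx]
    · rw [List.foldl_cons, if_neg h]
      have h' : (c x && !(PySem.Set.contains seen x)) = false := Bool.eq_false_iff.mpr h
      have ih2 := ih' ord seen
      constructor
      · rw [ih2.1, List.filter_cons, if_neg h]
      · intro y
        rw [ih2.2 y, List.contains_cons]
        by_cases hyx : y = x
        · subst hyx
          rcases Bool.and_eq_false_iff.mp h' with hc | hs
          · simp [hc]
          · have hst : PySem.Set.contains seen y = true := by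
              cases hh : PySem.Set.contains seen y
              · rw [hh] at hs; simp at hs
              · rfl
            have hm : y ∈ seen := by simpa [PySem.Set.contains] using hst
            simp [hm]
        · simp [beq_eq_false_iff_ne.mpr hyx]

-- A's second ordering loop (over sorted(set(webset)), guarded by 'seen' only)
lemma pv_foldA2 (xs : List Int) (hnd : xs.Nodup) :
    ∀ (ord : List Int) (seen : PySem.Set Int),
      (List.foldl
        (fun (st : List Int × PySem.Set Int) p =>
          if !(PySem.Set.contains st.2 p) then
            (st.1 ++ [p], PySem.Set.add st.2 p)
          else st)
        (ord, seen) xs).1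
        = ord ++ xs.filter (fun x => !(PySem.Set.contains seen x)) := by
  induction xs with
  | nil => intro ord seen; simp
  | cons x xs ih =>
    intro ord seen
    have hx : x ∉ xs := (List.nodup_cons.mp hnd).1
    have ih' := ih (List.nodup_cons.mp hnd).2
    by_cases h : (!(PySem.Set.contains seen x)) = true
    · rw [List.foldl_cons, if_pos h]
      rw [ih' (ord ++ [x]) (PySem.Set.add seen x)]
      have hf : xs.filter (fun z => !(PySem.Set.contains (PySem.Set.add seen x) z))
          = xs.filter (fun z => !(PySem.Set.contains seen z)) := by
        apply List.filter_congr
        intro z hz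
        have hzx : (z == x) = false := by
          simp only [beq_eq_false_iff_ne]; intro he; exact hx (he ▸ hz)
        rw [pv_contains_add, hzx, Bool.or_false]
      rw [hf, List.filter_cons, if_pos h]
      simp
    · rw [List.foldl_cons, if_neg h]
      rw [ih' ord seen, List.filter_cons, if_neg h]

-- A's combos loop is take(limit)
lemma pv_combos (limit : Int) :
    ∀ (xs : List Int) (acc : List (String × Int)), (acc.length : Int) < limit →
      pvCombosLoop limit xs acc
        = acc ++ (xs.map (fun p => (if pvHTTPS_PORTS.contains p then "https" else "http", p))).take
            (limit.toNat - acc.length) := by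
  intro xs
  induction xs with
  | nil => intro acc h; simp [pvCombosLoop]
  | cons x xs ih =>
    intro acc h
    rw [pvCombosLoop]
    simp only [List.length_append, List.length_cons, List.length_nil]
    by_cases hl : limit ≤ ((acc.length + 1 : Nat) : Int)
    · rw [if_pos (by exact_mod_cast hl)]
      have ht : limit.toNat - acc.length = 1 := by omega
      rw [List.map_cons, ht, List.take_succ_cons, List.take_zero]
    · rw [if_neg (by exact_mod_cast hl)]
      rw [ih (acc ++ [(if pvHTTPS_PORTS.contains x then "https" else "http", x)]) (by simp; omega)]
      have ht : limit.toNat - acc.length = (limit.toNat - (acc ++ [(if pvHTTPS_PORTS.contains x then "https" else "http", x)]).length) + 1 := by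
        simp; omega
      rw [ht, List.map_cons, List.take_succ_cons]
      simp

-- B's tuple-key sort is a plain sort under the lexicographic key
lemma pv_sorted2_eq_sorted_lex (xs : List Int) (k1 k2 : Int → Int) :
    PySem.List.sorted2 xs k1 k2 false
      = PySem.List.sorted xs (fun x => toLex ((k1 x, k2 x) : Int × Int)) false := by
  show List.foldl _ [] xs = List.foldl _ [] xs
  have hb : (fun (a b : Int) => decide (k1 a < k1 b) || !decide (k1 b < k1 a) && decide (k2 a < k2 b))
      = (fun (a b : Int) => decide (toLex ((k1 a, k2 a) : Int × Int) < toLex ((k1 b, k2 b) : Int × Int))) := by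
    funext a b
    by_cases h1 : k1 a < k1 b <;> by_cases h2 : k1 b < k1 a <;> by_cases h3 : k2 a < k2 b <;>
      simp [h1, h2, h3, Prod.Lex.toLex_lt_toLex] <;> omega
  simp only [if_neg (by decide : ¬(false = true))]
  rw [hb]

-- the two halves of A's ordered list assemble to the canonical filtered order
lemma pv_assemble (c : Int → Bool) (h9 : c 9443 = false) (h10 : c 10443 = false) :
    pvPORT_PREFERENCE.filter c ++ pvSORTED9.filter (fun a => c a && !(pvPORT_PREFERENCE.contains a)) = pvCANON.filter c := by
  have hc : pvCANON = pvPREF8 ++ [8008] := by decide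
  rw [hc, List.filter_append]
  have h1 : pvPORT_PREFERENCE.filter c = pvPREF8.filter c := by
    simp only [pvPORT_PREFERENCE, pvPREF8, List.filter_cons, List.filter_nil, h9, h10]
    simp
  have h2 : pvSORTED9.filter (fun a => c a && !(pvPORT_PREFERENCE.contains a)) = [8008].filter c := by
    have e80 : pvPORT_PREFERENCE.contains 80 = true := by decide
    have e443 : pvPORT_PREFERENCE.contains 443 = true := by decide
    have e3000 : pvPORT_PREFERENCE.contains 3000 = true := by decide
    have e5000 : pvPORT_PREFERENCE.contains 5000 = true := by decide
    have e8000 : pvPORT_PREFERENCE.contains 8000 = true := by decide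
    have e8008 : pvPORT_PREFERENCE.contains 8008 = false := by decide
    have e8080 : pvPORT_PREFERENCE.contains 8080 = true := by decide
    have e8443 : pvPORT_PREFERENCE.contains 8443 = true := by decide
    have e8888 : pvPORT_PREFERENCE.contains 8888 = true := by decide
    simp only [pvSORTED9, List.filter_cons, List.filter_nil, e80, e443, e3000, e5000, e8000, e8008, e8080, e8443, e8888]
    simp
  rw [h1, h2]

-- A's two ordering loops produce the canonical filtered order
lemma pv_orderedA (webset : List Int) (hsub : ∀ x ∈ webset, x ∈ pvWEB_PORTS) :
    ((PySem.List.sorted (PySem.Set.ofList webset) (fun x => x) false).foldl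
        (fun (st : List Int × PySem.Set Int) p =>
          if !(PySem.Set.contains st.2 p) then
            (st.1 ++ [p], PySem.Set.add st.2 p)
          else st)
        (pvPORT_PREFERENCE.foldl
          (fun (st : List Int × PySem.Set Int) pref =>
            if webset.contains pref && !(PySem.Set.contains st.2 pref) then
              (st.1 ++ [pref], PySem.Set.add st.2 pref)
            else st)
          ([], PySem.Set.empty))).1
    = pvCANON.filter (fun x => webset.contains x) := by
  obtain ⟨h1, h2⟩ := pv_foldA1 (fun p => webset.contains p) pvPORT_PREFERENCE (by decide) [] PySem.Set.empty
  have hS : PySem.List.sorted (PySem.Set.ofList webset) (fun x => x) false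
      = pvSORTED9.filter (fun x => webset.contains x) := by
    apply PySem.List.sorted_eq_of_perm_of_pairwise_lt
    · rw [List.perm_ext_iff_of_nodup (List.Nodup.filter _ (by decide)) (PySem.Set.nodup_ofList _)]
      intro a
      rw [PySem.Set.mem_ofList, List.mem_filter]
      constructor
      · rintro ⟨-, hc⟩; exact List.contains_iff_mem.mp hc
      · intro ha
        exact ⟨(by decide : ∀ x ∈ pvWEB_PORTS, x ∈ pvSORTED9) _ (hsub _ ha), List.contains_iff_mem.mpr ha⟩
    · exact List.Pairwise.filter _ (by decide)
  set st1 := pvPORT_PREFERENCE.foldl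
      (fun (st : List Int × PySem.Set Int) pref =>
        if webset.contains pref && !(PySem.Set.contains st.2 pref) then
          (st.1 ++ [pref], PySem.Set.add st.2 pref)
        else st)
      ([], PySem.Set.empty) with hst1
  have hnodS : (PySem.List.sorted (PySem.Set.ofList webset) (fun x => x) false).Nodup := by
    rw [hS]; exact List.Nodup.filter _ (by decide)
  rw [show st1 = (st1.1, st1.2) from rfl]
  rw [pv_foldA2 _ hnodS st1.1 st1.2]
  have hst11 : st1.1 = pvPORT_PREFERENCE.filter (fun x => webset.contains x) := by
    rw [h1, List.nil_append]
    apply List.filter_congr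
    intro x _
    simp [PySem.Set.contains, PySem.Set.empty]
  have hpred : (fun x => !(PySem.Set.contains st1.2 x))
      = (fun x => !(webset.contains x && pvPORT_PREFERENCE.contains x)) := by
    funext x
    rw [h2 x]
    simp [PySem.Set.contains, PySem.Set.empty]
  rw [hst11, hpred, hS, List.filter_filter]
  have hbool : (fun a => (!(webset.contains a && pvPORT_PREFERENCE.contains a)) && webset.contains a)
      = (fun a => webset.contains a && !(pvPORT_PREFERENCE.contains a)) := by
    funext a
    cases webset.contains a <;> simp
  rw [hbool]
  have h9 : webset.contains 9443 = false := by
    cases h : webset.contains 9443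
    · rfl
    · exact absurd (hsub _ (List.contains_iff_mem.mp h)) (by decide)
  have h10 : webset.contains 10443 = false := by
    cases h : webset.contains 10443
    · rfl
    · exact absurd (hsub _ (List.contains_iff_mem.mp h)) (by decide)
  exact pv_assemble _ h9 h10

-- B's single sort produces the same canonical filtered order
lemma pv_orderedB (webset : List Int) (hsub : ∀ x ∈ webset, x ∈ pvWEB_PORTS) :
    PySem.List.sorted2 (PySem.Set.ofList webset)
      (fun p => PySem.Dict.getD
        ((PySem.List.enumerate pvPORT_PREFERENCE).foldl (fun d iv => d.insert iv.2 iv.1) PySem.Dict.empty)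
        p ((pvPORT_PREFERENCE.length : Int)))
      (fun p => p) false
    = pvCANON.filter (fun x => webset.contains x) := by
  rw [pv_sorted2_eq_sorted_lex]
  apply PySem.List.sorted_eq_of_perm_of_pairwise_lt
  · rw [List.perm_ext_iff_of_nodup (List.Nodup.filter _ (by decide)) (PySem.Set.nodup_ofList _)]
    intro a
    rw [PySem.Set.mem_ofList, List.mem_filter]
    constructor
    · rintro ⟨-, hc⟩; exact List.contains_iff_mem.mp hc
    · intro ha
      exact ⟨(by decide : ∀ x ∈ pvWEB_PORTS, x ∈ pvCANON) _ (hsub _ ha), List.contains_iff_mem.mpr ha⟩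
  · exact List.Pairwise.filter _ (by decide)

-- ===== VERDICT (by name: the statement is the Claim_ definition above) =====
theorem choose_schemes_and_ports_spec : Claim_equal_choose_schemes_and_ports := by
  intro ports limit _
  unfold Spec_choose_schemes_and_ports choose_schemes_and_ports choose_schemes_and_ports_alt
  by_cases hl : limit ≤ 0
  · rw [if_pos hl, if_pos hl]
  · rw [if_neg hl, if_neg hl]
    simp only []
    set webset := ports.filter (fun p => pvWEB_PORTS.contains p) with hw
    have hsub : ∀ x ∈ webset, x ∈ pvWEB_PORTS := by
      intro x hx
      rw [hw] at hx
      exact List.contains_iff_mem.mp (List.mem_filter.mp hx).2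
    by_cases he : webset = []
    · rw [if_pos he, if_pos (by rw [he]; rfl)]
    · have hne : PySem.Set.ofList webset ≠ [] := by
        intro h0
        apply he
        rw [List.eq_nil_iff_forall_not_mem]
        intro a ha
        exact (List.eq_nil_iff_forall_not_mem.mp h0) a ((PySem.Set.mem_ofList _ _).mpr ha)
      rw [if_neg he, if_neg hne]
      rw [pv_orderedA webset hsub, pv_orderedB webset hsub]
      rw [pv_combos limit _ [] (by simp; omega)]
      rw [show (some limit : Option Int) = some ((limit.toNat : Nat) : Int) by congr 1; omega]
      rw [PySem.List.slice_to_natCast]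
      simp
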